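-- pv_equiv track=rewrite | github.com/pypi-data/pypi-mirror-391 | packages/hcom/hcom-0.6.3.tar.gz/hcom-0.6.3/src/hcom/shared.py | format_env_value
-- ===== SOURCE A (Python) =====
-- def format_env_value(value: str) -> str:
--     """Format value for ENV file with proper quoting (inverse of parse_env_value)"""
--     if not value:
--         return value
--
--     # Check if quoting needed for special characters
--     needs_quoting = any(c in value for c in ['\n', '\t', '"', "'", ' ', '\r'])
--
--     if needs_quoting:
--         # Use double quotes with proper escaping
--         escaped = value.replace('\\', '\\\\')  # Escape backslashes first
--         escaped = escaped.replace('\n', '\\n')  # Escape newlines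
--         escaped = escaped.replace('\t', '\\t')  # Escape tabs
--         escaped = escaped.replace('\r', '\\r')  # Escape carriage returns
--         escaped = escaped.replace('"', '\\"')   # Escape double quotes
--         return f'"{escaped}"'
--
--     return value
-- ===== SOURCE B (Python) =====
-- def format_env_value(value: str) -> str:
--     """Format value for ENV file with proper quoting (inverse of parse_env_value)"""
--     if not value:
--         return value
--     # One fused pass: build the escaped text and discover whether quoting is
--     # needed at the same time, instead of a detection scan plus staged replaces.
--     out = []
--     needs = False
--     for c in value:
--         if c == '\\':
--             out.append('\\\\')
--         elif c == '\n':
--             out.append('\\n')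
--             needs = True
--         elif c == '\t':
--             out.append('\\t')
--             needs = True
--         elif c == '\r':
--             out.append('\\r')
--             needs = True
--         elif c == '"':
--             out.append('\\"')
--             needs = True
--         else:
--             out.append(c)
--             if c == ' ' or c == "'":
--                 needs = True
--     if needs:
--         return '"' + ''.join(out) + '"'
--     return value
-- ===== Notes on version B (the rewrite author's own statement) =====
-- stated objective: alternative
-- what changed: A runs a detection scan (six substring searches) and then five staged whole-string replace passes; B is a single fused left-to-right loop with an accumulator that escapes each character and records whether quoting is needed in the same pass, then picks the quoted or raw form at the end.
import Mathlib
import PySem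

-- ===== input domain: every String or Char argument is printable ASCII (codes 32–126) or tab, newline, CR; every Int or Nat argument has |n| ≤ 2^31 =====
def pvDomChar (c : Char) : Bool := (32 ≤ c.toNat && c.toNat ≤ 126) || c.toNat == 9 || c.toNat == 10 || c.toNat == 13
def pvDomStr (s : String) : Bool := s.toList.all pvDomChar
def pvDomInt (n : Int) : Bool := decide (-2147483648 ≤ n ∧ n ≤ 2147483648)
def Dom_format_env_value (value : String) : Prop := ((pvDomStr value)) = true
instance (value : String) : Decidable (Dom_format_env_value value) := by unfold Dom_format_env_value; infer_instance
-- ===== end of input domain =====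

-- B fuses A's detection scan and five staged replace passes into one accumulator loop; same return value.


-- ===== PORT A =====
-- literal transliteration of A: empty guard, six substring-membership tests, five chained replaces
def format_env_value (value : String) : String :=
  if value = "" then value
  else
    let needs_quoting :=
      PySem.Str.isIn "\n" value || PySem.Str.isIn "\t" value || PySem.Str.isIn "\"" value ||
      PySem.Str.isIn "'" value || PySem.Str.isIn " " value || PySem.Str.isIn "\r" value
    if needs_quoting then
      let escaped := PySem.Str.replace value "\\" "\\\\"
      let escaped := PySem.Str.replace escaped "\n" "\\n"
      let escaped := PySem.Str.replace escaped "\t" "\\t"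
      let escaped := PySem.Str.replace escaped "\r" "\\r"
      let escaped := PySem.Str.replace escaped "\"" "\\\""
      "\"" ++ escaped ++ "\""
    else value

-- ===== PORT B =====
-- B's loop body: escape one character into the accumulator and update the needs flag
def pvStep (acc : List Char × Bool) (c : Char) : List Char × Bool :=
  if c = '\\' then (acc.1 ++ ['\\', '\\'], acc.2)
  else if c = '\n' then (acc.1 ++ ['\\', 'n'], true)
  else if c = '\t' then (acc.1 ++ ['\\', 't'], true)
  else if c = '\r' then (acc.1 ++ ['\\', 'r'], true)
  else if c = '"' then (acc.1 ++ ['\\', '"'], true)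
  else (acc.1 ++ [c], acc.2 || (c == ' ' || c == '\''))

def format_env_value_alt (value : String) : String :=
  if value = "" then value
  else
    let r := value.toList.foldl pvStep ([], false)
    if r.2 then String.ofList ('"' :: r.1 ++ ['"']) else value

-- ===== PRECONDITION & SPEC =====
def Spec_format_env_value (value : String) (out : String) : Prop := out = format_env_value_alt value
instance (value : String) (out : String) : Decidable (Spec_format_env_value value out) := by unfold Spec_format_env_value; infer_instance

-- ===== CLAIM (what is proved, stated in full; the proofs are below) =====
def Claim_equal_format_env_value : Prop := ∀ (value : String), Dom_format_env_value value → Spec_format_env_value value (format_env_value value)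

-- ===== LEMMAS AND PROOFS =====

-- the per-character escape map and the special-character predicate (proof-side characterisation)
def pvEsc (c : Char) : List Char :=
  if c = '\\' then ['\\', '\\']
  else if c = '\n' then ['\\', 'n']
  else if c = '\t' then ['\\', 't']
  else if c = '\r' then ['\\', 'r']
  else if c = '"' then ['\\', '"']
  else [c]

def pvSpecial (c : Char) : Bool :=
  c == '\n' || c == '\t' || c == '"' || c == '\'' || c == ' ' || c == '\r'

-- pvStep in terms of the escape map and special predicate
theorem pvStep_eq (acc : List Char) (b : Bool) (c : Char) :
    pvStep (acc, b) c = (acc ++ pvEsc c, b || pvSpecial c) := by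
  by_cases h1 : c = '\\' <;> by_cases h2 : c = '\n' <;> by_cases h3 : c = '\t' <;>
    by_cases h4 : c = '\r' <;> by_cases h5 : c = '"' <;> by_cases h6 : c = ' ' <;>
    by_cases h7 : c = '\'' <;> simp_all [pvStep, pvEsc, pvSpecial] <;>
    (try simp [show (c == ' ') = false from beq_eq_false_iff_ne.mpr h6,
      show (c == '\'') = false from beq_eq_false_iff_ne.mpr h7,
      show (c == '\n') = false from beq_eq_false_iff_ne.mpr h2,
      show (c == '\t') = false from beq_eq_false_iff_ne.mpr h3,
      show (c == '\r') = false from beq_eq_false_iff_ne.mpr h4,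
      show (c == '"') = false from beq_eq_false_iff_ne.mpr h5])

-- B's fused fold computes exactly (escaped text, any special)
theorem foldl_pvStep (l : List Char) :
    ∀ (acc : List Char) (b : Bool),
      l.foldl pvStep (acc, b) = (acc ++ l.flatMap pvEsc, b || l.any pvSpecial) := by
  induction l with
  | nil => intro acc b; simp
  | cons c t ih =>
    intro acc b
    rw [List.foldl_cons, pvStep_eq, ih]
    simp [Bool.or_assoc]

-- single-char replace is a per-character flatMap
theorem replace_go_single (d : Char) (new : List Char) :
    ∀ (l acc : List Char) (fuel : Nat), l.length ≤ fuel →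
      PySem.Chars.replace.go [d] new fuel l acc
        = acc.reverse ++ l.flatMap (fun x => if x = d then new else [x]) := by
  intro l
  induction l with
  | nil =>
    intro acc fuel _
    cases fuel <;> simp [PySem.Chars.replace.go]
  | cons c t ih =>
    intro acc fuel hf
    cases fuel with
    | zero => simp at hf
    | succ n =>
      have hn : t.length ≤ n := by simp at hf; omega
      by_cases h : c = d
      · subst h
        have hp : List.isPrefixOf [c] (c :: t) = true := by simp [List.isPrefixOf]
        simp only [PySem.Chars.replace.go, hp, if_pos]
        rw [show List.drop [c].length (c :: t) = t from rfl,
            ih (new.reverse ++ acc) n (by simpa using hn)]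
        simp
      · have hp : List.isPrefixOf [d] (c :: t) = false := by
          simp [List.isPrefixOf]; exact fun hdc => h hdc.symm
        simp only [PySem.Chars.replace.go, hp]
        rw [ih (c :: acc) n hn]
        simp [h]

theorem replace_single (s : List Char) (d : Char) (new : List Char) :
    PySem.Chars.replace s [d] new = s.flatMap (fun x => if x = d then new else [x]) := by
  simpa using replace_go_single d new s [] s.length (le_refl _)

-- the five chained per-character maps collapse to the escape map
theorem chain_char (c : Char) :
    List.flatMap (fun x =>
      List.flatMap (fun x =>
        List.flatMap (fun x =>
          List.flatMap (fun x => if x = '"' then ['\\','"'] else [x])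
            (if x = '\r' then ['\\','r'] else [x]))
          (if x = '\t' then ['\\','t'] else [x]))
        (if x = '\n' then ['\\','n'] else [x]))
      (if c = '\\' then ['\\','\\'] else [c]) = pvEsc c := by
  by_cases h1 : c = '\\' <;> by_cases h2 : c = '\n' <;> by_cases h3 : c = '\t' <;>
    by_cases h4 : c = '\r' <;> by_cases h5 : c = '"' <;>
    simp_all [pvEsc]

theorem chain_eq (s : List Char) :
    ((((s.flatMap (fun x => if x = '\\' then ['\\','\\'] else [x])).flatMap
        (fun x => if x = '\n' then ['\\','n'] else [x])).flatMap
        (fun x => if x = '\t' then ['\\','t'] else [x])).flatMap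
        (fun x => if x = '\r' then ['\\','r'] else [x])).flatMap
        (fun x => if x = '"' then ['\\','"'] else [x]) = s.flatMap pvEsc := by
  simp only [List.flatMap_assoc]
  exact List.flatMap_congr (fun c _ => chain_char c)

-- a one-char substring test is list membership
theorem isIn_single (value : String) (c : Char) :
    PySem.Str.isIn (String.ofList [c]) value = value.toList.contains c := by
  rw [Bool.eq_iff_iff]
  simp [PySem.Chars.isIn_iff_infix, List.singleton_infix_iff]

-- A's six substring tests agree with 'any pvSpecial'
theorem needs_eq (value : String) :
    (PySem.Str.isIn "\n" value || PySem.Str.isIn "\t" value || PySem.Str.isIn "\"" value ||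
     PySem.Str.isIn "'" value || PySem.Str.isIn " " value || PySem.Str.isIn "\r" value)
      = value.toList.any pvSpecial := by
  show (PySem.Str.isIn (String.ofList ['\n']) value || PySem.Str.isIn (String.ofList ['\t']) value ||
      PySem.Str.isIn (String.ofList ['"']) value || PySem.Str.isIn (String.ofList ['\'']) value ||
      PySem.Str.isIn (String.ofList [' ']) value || PySem.Str.isIn (String.ofList ['\r']) value) = _
  rw [isIn_single, isIn_single, isIn_single, isIn_single, isIn_single, isIn_single,
      Bool.eq_iff_iff]
  simp only [List.any_eq_true, pvSpecial, Bool.or_eq_true, List.contains_eq_mem,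
    decide_eq_true_eq, beq_iff_eq]
  constructor
  · rintro (((((h|h)|h)|h)|h)|h) <;> exact ⟨_, h, by simp⟩
  · rintro ⟨c, hc, ((((rfl|rfl)|rfl)|rfl)|rfl)|rfl⟩ <;> simp [hc]

-- ===== VERDICT (by name: the statement is the Claim_ definition above) =====
theorem format_env_value_spec : Claim_equal_format_env_value := by
  intro value _
  unfold Spec_format_env_value
  by_cases he : value = ""
  · simp [format_env_value, format_env_value_alt, he]
  · simp only [format_env_value, format_env_value_alt, he, ite_false]
    rw [needs_eq, foldl_pvStep]
    by_cases hn : value.toList.any pvSpecial = true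
    case neg => simp [hn]
    simp only [hn, if_true, Bool.false_or]
    apply String.ext
    rw [String.toList_append, String.toList_append,
        PySem.Str.toList_replace, PySem.Str.toList_replace, PySem.Str.toList_replace,
        PySem.Str.toList_replace, PySem.Str.toList_replace,
        show ("\\" : String).toList = ['\\'] from by decide,
        show ("\\\\" : String).toList = ['\\','\\'] from by decide,
        show ("\n" : String).toList = ['\n'] from by decide,
        show ("\\n" : String).toList = ['\\','n'] from by decide,
        show ("\t" : String).toList = ['\t'] from by decide,
        show ("\\t" : String).toList = ['\\','t'] from by decide,
        show ("\r" : String).toList = ['\r'] from by decide,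
        show ("\\r" : String).toList = ['\\','r'] from by decide,
        show ("\"" : String).toList = ['"'] from by decide,
        show ("\\\"" : String).toList = ['\\','"'] from by decide,
        replace_single, replace_single, replace_single, replace_single, replace_single, chain_eq]
    simp
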